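-- pv_equiv track=rewrite | github.com/docxology/MetaInformAnt | src/metainformant/dna/integration/rna.py | analyze_regulatory_elements
-- ===== SOURCE A (Python) =====
-- from typing import Dict, List, Optional, Tuple
--
-- def analyze_regulatory_elements(dna_sequence: str) -> Dict[str, List[Tuple[int, str]]]:
--     """Analyze regulatory elements in DNA sequence.
--
--     Args:
--         dna_sequence: DNA sequence to analyze
--
--     Returns:
--         Dictionary mapping element types to (position, sequence) tuples
--
--     Example:
--         >>> dna = "TATAATCGGGGCGGR"
--         >>> elements = analyze_regulatory_elements(dna)
--         >>> isinstance(elements, dict)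
--         True
--     """
--     elements = {"tata_box": [], "caat_box": [], "gc_box": [], "enhancer_motifs": []}
--
--     # TATA box
--     tata_positions = []
--     for match in find_motif_positions(dna_sequence, "TATA"):
--         tata_positions.append((match, dna_sequence[match : match + 4]))
--     elements["tata_box"] = tata_positions
--
--     # CAAT box
--     caat_positions = []
--     for match in find_motif_positions(dna_sequence, "CAAT"):
--         caat_positions.append((match, dna_sequence[match : match + 4]))
--     elements["caat_box"] = caat_positions
--
--     # GC box (SP1 binding site)
--     gc_positions = []
--     for match in find_motif_positions(dna_sequence, "GGGCGG"):
--         gc_positions.append((match, dna_sequence[match : match + 6]))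
--     elements["gc_box"] = gc_positions
--
--     return elements
--
-- def find_motif_positions(sequence: str, motif: str) -> List[int]:
--     """Find motif positions in sequence (helper function)."""
--     positions = []
--     motif_len = len(motif)
--     for i in range(len(sequence) - motif_len + 1):
--         if sequence[i : i + motif_len].upper() == motif.upper():
--             positions.append(i)
--     return positions
-- ===== SOURCE B (Python) =====
-- def analyze_regulatory_elements(dna_sequence: str):
--     """Single pass over the sequence instead of three separate motif scans."""
--     tata, caat, gbox = [], [], []
--     for i in range(len(dna_sequence)):
--         if dna_sequence[i:i + 4].upper() == "TATA":
--             tata.append((i, dna_sequence[i:i + 4]))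
--         if dna_sequence[i:i + 4].upper() == "CAAT":
--             caat.append((i, dna_sequence[i:i + 4]))
--         if dna_sequence[i:i + 6].upper() == "GGGCGG":
--             gbox.append((i, dna_sequence[i:i + 6]))
--     return {"tata_box": tata, "caat_box": caat, "gc_box": gbox, "enhancer_motifs": []}
-- ===== Notes on version B (the rewrite author's own statement) =====
-- stated objective: simpler
-- what changed: Replaces the three separate find_motif_positions scans and the pre-seeded dict with one pass over the sequence indices that appends each hit to the matching motif list directly.
import Mathlib
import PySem

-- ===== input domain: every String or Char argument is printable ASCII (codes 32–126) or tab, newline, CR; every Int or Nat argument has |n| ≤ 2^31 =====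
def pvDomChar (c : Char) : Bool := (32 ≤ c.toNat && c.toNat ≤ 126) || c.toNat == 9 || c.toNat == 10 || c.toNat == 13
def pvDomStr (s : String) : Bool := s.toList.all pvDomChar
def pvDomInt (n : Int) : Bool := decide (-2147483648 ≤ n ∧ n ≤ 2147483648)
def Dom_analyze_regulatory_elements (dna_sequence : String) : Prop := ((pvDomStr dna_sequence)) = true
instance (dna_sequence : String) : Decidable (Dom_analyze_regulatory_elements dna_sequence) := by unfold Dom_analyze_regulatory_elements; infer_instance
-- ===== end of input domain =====

-- B replaces A's three separate motif scans (and the pre-seeded dict) with one pass over the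
-- sequence indices that appends each hit to the matching motif list directly; objective: simpler.

-- ===== PORT A =====
-- helper of A: find_motif_positions(sequence, motif)
def find_motif_positions (sequence : List Char) (motif : List Char) : List Int :=
  let motif_len := motif.length
  (PySem.List.pyRange 0 ((sequence.length : Int) - (motif_len : Int) + 1) 1).foldl
    (fun positions i =>
      if PySem.Chars.upper (PySem.Chars.slice sequence (some i) (some (i + (motif_len : Int))))
          == PySem.Chars.upper motif
      then positions ++ [i] else positions) []

def analyze_regulatory_elements (dna_sequence : String) : List (String × List (Int × String)) :=
  let cs := dna_sequence.toList
  let elements : PySem.Dict String (List (Int × String)) :=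
    ((((PySem.Dict.empty).insert "tata_box" []).insert "caat_box" []).insert "gc_box" []).insert "enhancer_motifs" []
  let tata_positions := (find_motif_positions cs ['T','A','T','A']).foldl
      (fun acc m => acc ++ [(m, String.ofList (PySem.Chars.slice cs (some m) (some (m + 4))))]) []
  let elements := elements.insert "tata_box" tata_positions
  let caat_positions := (find_motif_positions cs ['C','A','A','T']).foldl
      (fun acc m => acc ++ [(m, String.ofList (PySem.Chars.slice cs (some m) (some (m + 4))))]) []
  let elements := elements.insert "caat_box" caat_positions
  let gc_positions := (find_motif_positions cs ['G','G','G','C','G','G']).foldl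
      (fun acc m => acc ++ [(m, String.ofList (PySem.Chars.slice cs (some m) (some (m + 6))))]) []
  let elements := elements.insert "gc_box" gc_positions
  elements.items

-- ===== PORT B =====
def analyze_regulatory_elements_alt (dna_sequence : String) : List (String × List (Int × String)) :=
  let cs := dna_sequence.toList
  let st := (PySem.List.pyRange 0 (cs.length : Int) 1).foldl
    (fun (st : List (Int × String) × List (Int × String) × List (Int × String)) i =>
      ( if PySem.Chars.upper (PySem.Chars.slice cs (some i) (some (i + 4))) == ['T','A','T','A']
          then st.1 ++ [(i, String.ofList (PySem.Chars.slice cs (some i) (some (i + 4))))] else st.1,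
        if PySem.Chars.upper (PySem.Chars.slice cs (some i) (some (i + 4))) == ['C','A','A','T']
          then st.2.1 ++ [(i, String.ofList (PySem.Chars.slice cs (some i) (some (i + 4))))] else st.2.1,
        if PySem.Chars.upper (PySem.Chars.slice cs (some i) (some (i + 6))) == ['G','G','G','C','G','G']
          then st.2.2 ++ [(i, String.ofList (PySem.Chars.slice cs (some i) (some (i + 6))))] else st.2.2 ))
    ([], [], [])
  [("tata_box", st.1), ("caat_box", st.2.1), ("gc_box", st.2.2), ("enhancer_motifs", [])]

-- ===== PRECONDITION & SPEC =====
def Spec_analyze_regulatory_elements (dna_sequence : String) (out : List (String × List (Int × String))) : Prop := out = analyze_regulatory_elements_alt dna_sequence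
instance (dna_sequence : String) (out : List (String × List (Int × String))) : Decidable (Spec_analyze_regulatory_elements dna_sequence out) := by unfold Spec_analyze_regulatory_elements; infer_instance

-- ===== CLAIM (what is proved, stated in full; the proofs are below) =====
def Claim_equal_analyze_regulatory_elements : Prop := ∀ (dna_sequence : String), Dom_analyze_regulatory_elements dna_sequence → Spec_analyze_regulatory_elements dna_sequence (analyze_regulatory_elements dna_sequence)

-- ===== LEMMAS AND PROOFS =====

-- B's fold keeps a triple whose components are updated independently: split it into three folds.
theorem foldl_triple {α β γ δ : Type} (l : List α) (f : β → α → β) (g : γ → α → γ) (h : δ → α → δ)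
    (b : β) (c : γ) (d : δ) :
    l.foldl (fun s x => (f s.1 x, g s.2.1 x, h s.2.2 x)) (b, c, d) =
      (l.foldl f b, l.foldl g c, l.foldl h d) := by
  induction l generalizing b c d with
  | nil => rfl
  | cons x xs ih => simpa using ih (f b x) (g c x) (h d x)

-- indices pastlen − L + 1 cannot match a motif of length L (the slice is shorter)
theorem pred_false_of_large (cs : List Char) (M : List Char) (L : Nat) (hlen : M.length = L)
    (h1 : 1 ≤ L) (i : Nat) (hi : cs.length < i + L) :
    (PySem.Chars.upper (PySem.Chars.slice cs (some (i : Int)) (some ((i : Int) + (L : Int)))) == M) = false := by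
  have hc : ((i : Int) + (L : Int)) = ((i + L : Nat) : Int) := by push_cast; ring
  rw [hc, beq_eq_false_iff_ne]
  intro hEq
  have hl : (PySem.Chars.upper (PySem.Chars.slice cs (some (i : Int)) (some ((i + L : Nat) : Int)))).length = L := by
    rw [hEq, hlen]
  rw [PySem.Chars.upper, List.length_map, PySem.Chars.slice_eq_listSlice, PySem.List.slice_natCast] at hl
  simp only [List.length_take, List.length_drop] at hl
  omega

-- a filter over a longer cast index range is unchanged when the predicate is false on the extension
theorem filter_map_range_eq (p : Int → Bool) (a n : Nat) (hle : a ≤ n)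
    (hfalse : ∀ i : Nat, a ≤ i → i < n → p (i : Int) = false) :
    ((List.range a).map (fun (k : Nat) => (k : Int))).filter p
      = ((List.range n).map (fun (k : Nat) => (k : Int))).filter p := by
  induction n with
  | zero => have h0 : a = 0 := by omega
            rw [h0]
  | succ m ih =>
    by_cases hc : a = m + 1
    · rw [hc]
    · have ham : a ≤ m := by omega
      rw [List.range_succ, List.map_append, List.filter_append,
          ih ham (fun i hi1 hi2 => hfalse i hi1 (by omega))]
      simp [hfalse m ham (by omega)]

-- A's truncated scan range gives the same filtered index list as the full range of B.
theorem filter_range_ext (cs : List Char) (M : List Char) (L : Nat) (hlen : M.length = L) (h1 : 1 ≤ L) :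
    (PySem.List.pyRange 0 ((cs.length : Int) - (L : Int) + 1) 1).filter
        (fun i => PySem.Chars.upper (PySem.Chars.slice cs (some i) (some (i + (L : Int)))) == M)
      = (PySem.List.pyRange 0 (cs.length : Int) 1).filter
        (fun i => PySem.Chars.upper (PySem.Chars.slice cs (some i) (some (i + (L : Int)))) == M) := by
  set n := cs.length with hn
  set a := n + 1 - L with ha
  have hA : PySem.List.pyRange 0 ((n : Int) - (L : Int) + 1) 1 = PySem.List.pyRange 0 ((a : Nat) : Int) 1 := by
    by_cases hc : L ≤ n + 1
    · have he : ((n : Int) - (L : Int) + 1) = ((a : Nat) : Int) := by omega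
      rw [he]
    · have ha0 : a = 0 := by omega
      rw [PySem.List.pyRange_of_pos 0 _ (by norm_num : (0:Int) < 1),
          PySem.List.pyRange_of_pos 0 _ (by norm_num : (0:Int) < 1)]
      simp [ha0, show ¬ ((0:Int) < (n : Int) - (L : Int) + 1) by omega]
  rw [hA, PySem.List.pyRange_zero_natCast, PySem.List.pyRange_zero_natCast]
  exact filter_map_range_eq
    (fun i => PySem.Chars.upper (PySem.Chars.slice cs (some i) (some (i + (L : Int)))) == M)
    a n (by omega)
    (fun i hai hin => pred_false_of_large cs M L hlen h1 i (by omega))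

-- the common shape of each motif list: map-over-filter of the full index range
theorem motif_list_eq (cs : List Char) (M : List Char) (L : Nat)
    (hM : PySem.Chars.upper M = M) (hlen : M.length = L) (h1 : 1 ≤ L) :
    (find_motif_positions cs M).foldl
        (fun acc m => acc ++ [(m, String.ofList (PySem.Chars.slice cs (some m) (some (m + (L : Int)))))]) []
      = ((PySem.List.pyRange 0 (cs.length : Int) 1).filter
          (fun i => PySem.Chars.upper (PySem.Chars.slice cs (some i) (some (i + (L : Int)))) == M)).map
          (fun i => (i, String.ofList (PySem.Chars.slice cs (some i) (some (i + (L : Int)))))) := by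
  rw [PySem.List.foldl_append_singleton_eq_map, List.nil_append]
  unfold find_motif_positions
  rw [hM, hlen]
  rw [PySem.List.foldl_append_if
    (fun i => PySem.Chars.upper (PySem.Chars.slice cs (some i) (some (i + (L : Int)))) == M)
    (fun i => i)]
  rw [List.nil_append, List.map_id']
  rw [filter_range_ext cs M L hlen h1]

-- ===== VERDICT (by name: the statement is the Claim_ definition above) =====
theorem analyze_regulatory_elements_spec : Claim_equal_analyze_regulatory_elements := by
  intro s _
  unfold Spec_analyze_regulatory_elements
  have hsplit3 := foldl_triple (PySem.List.pyRange 0 (s.toList.length : Int) 1)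
    (fun t (i : Int) => if PySem.Chars.upper (PySem.Chars.slice s.toList (some i) (some (i + 4))) == ['T','A','T','A']
        then t ++ [(i, String.ofList (PySem.Chars.slice s.toList (some i) (some (i + 4))))] else t)
    (fun c (i : Int) => if PySem.Chars.upper (PySem.Chars.slice s.toList (some i) (some (i + 4))) == ['C','A','A','T']
        then c ++ [(i, String.ofList (PySem.Chars.slice s.toList (some i) (some (i + 4))))] else c)
    (fun g (i : Int) => if PySem.Chars.upper (PySem.Chars.slice s.toList (some i) (some (i + 6))) == ['G','G','G','C','G','G']
        then g ++ [(i, String.ofList (PySem.Chars.slice s.toList (some i) (some (i + 6))))] else g)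
    [] [] []
  simp only [] at hsplit3
  have hT := motif_list_eq s.toList ['T','A','T','A'] 4 (by decide) (by decide) (by decide)
  have hC := motif_list_eq s.toList ['C','A','A','T'] 4 (by decide) (by decide) (by decide)
  have hG := motif_list_eq s.toList ['G','G','G','C','G','G'] 6 (by decide) (by decide) (by decide)
  push_cast at hT hC hG
  simp only [analyze_regulatory_elements, analyze_regulatory_elements_alt]
  rw [hsplit3, hT, hC, hG]
  rw [PySem.List.foldl_append_if, PySem.List.foldl_append_if, PySem.List.foldl_append_if]
  simp [PySem.Dict.insert, PySem.Dict.empty, PySem.Dict.contains]
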